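-- pv_equiv track=rewrite | github.com/Fondamenti18/fondamenti-di-programmazione | students/1743829/homework04/program01.py | albero
-- ===== SOURCE A (Python) =====
-- def albero(diz,x,diz_ris):
--     if x in diz:
--         if diz[x]==[]:
--             diz_ris[x]=[]
--         if diz[x]!=[]:
--             diz_ris[x]=diz[x]
--             for i in diz[x]:
--                 albero(diz,i,diz_ris)
--         return diz_ris
-- ===== SOURCE B (Python) =====
-- def albero(diz, x, diz_ris):
--     # Iterative DFS with an explicit stack and a visited set; writes the same
--     # entries into diz_ris (mutated in place, like the original) in the same
--     # first-visit preorder, but visits each node once instead of re-walking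
--     # shared subtrees.
--     if x not in diz:
--         return None
--     visited = set()
--     stack = [x]
--     while stack:
--         n = stack.pop()
--         if n in visited or n not in diz:
--             continue
--         visited.add(n)
--         children = diz[n]
--         diz_ris[n] = children or []
--         stack.extend(reversed(children))
--     return diz_ris
-- ===== Notes on version B (the rewrite author's own statement) =====
-- stated objective: alternative
-- what changed: A's naive recursion (which re-descends into shared subtrees every time they are reached) is replaced by an iterative DFS over an explicit stack with a visited set, so every key is processed at most once.
import Mathlib
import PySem

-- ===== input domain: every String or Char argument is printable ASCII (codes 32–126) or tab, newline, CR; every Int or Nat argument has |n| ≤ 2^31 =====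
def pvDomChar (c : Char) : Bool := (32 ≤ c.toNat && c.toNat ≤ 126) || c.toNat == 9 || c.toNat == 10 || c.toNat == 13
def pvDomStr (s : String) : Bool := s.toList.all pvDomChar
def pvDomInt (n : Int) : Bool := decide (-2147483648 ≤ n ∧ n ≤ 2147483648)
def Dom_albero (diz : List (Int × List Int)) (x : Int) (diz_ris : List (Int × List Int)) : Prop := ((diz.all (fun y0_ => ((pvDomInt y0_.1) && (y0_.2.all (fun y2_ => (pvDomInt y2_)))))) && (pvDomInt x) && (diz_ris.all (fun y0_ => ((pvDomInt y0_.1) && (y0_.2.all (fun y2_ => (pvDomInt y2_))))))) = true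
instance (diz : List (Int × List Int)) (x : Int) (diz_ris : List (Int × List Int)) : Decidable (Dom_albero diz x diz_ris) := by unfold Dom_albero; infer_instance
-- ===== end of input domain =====

-- B replaces A's naive recursive descent (which re-walks shared subtrees) by an iterative
-- DFS with an explicit stack and a visited set; both mutate diz_ris in place in Python —
-- the equivalence proved here is about the RETURN value.

-- ===== PORT A =====
-- A's recursion, with explicit depth fuel (under Pre_ no key repeats on a path from x, so the
-- recursion is never deeper than diz.length+1 and the fuel used below is never exhausted).
mutual
def goA (diz : List (Int × List Int)) (f : Nat) (x : Int) (d : PySem.Dict Int (List Int)) : Option (PySem.Dict Int (List Int)) :=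
  match f with
  | 0 => none
  | f' + 1 =>
    match PySem.Dict.get? (PySem.Dict.mk diz) x with
    | none => some d                                     -- "if x in diz" fails: no mutation
    | some l =>
      let d1 := if l = [] then PySem.Dict.insert d x [] else d       -- if diz[x]==[]: diz_ris[x]=[]
      let d2 := if l ≠ [] then PySem.Dict.insert d1 x l else d1      -- if diz[x]!=[]: diz_ris[x]=diz[x]
      goAList diz f' l d2                                            -- for i in diz[x]: albero(diz,i,diz_ris)
termination_by (f, 0)

def goAList (diz : List (Int × List Int)) (f : Nat) (l : List Int) (d : PySem.Dict Int (List Int)) : Option (PySem.Dict Int (List Int)) :=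
  match l with
  | [] => some d
  | i :: t =>
    match goA diz f i d with
    | none => none
    | some d' => goAList diz f t d'
termination_by (f, l.length + 1)

end

def albero (diz : List (Int × List Int)) (x : Int) (diz_ris : List (Int × List Int)) : Option (List (Int × List Int)) :=
  if PySem.Dict.contains (PySem.Dict.mk diz) x then
    Option.map PySem.Dict.items (goA diz (diz.length + 1) x (PySem.Dict.mk diz_ris))
  else none                                              -- falls off the end: returns None

-- ===== PORT B =====
-- termination measure for the stack loop: total weight of the not-yet-visited keys plus stack size
def pvKD (diz : List (Int × List Int)) : List Int := PySem.List.dedup (diz.map Prod.fst)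
def pvWgt (diz : List (Int × List Int)) (k : Int) : Nat := 1 + ((PySem.Dict.get? (PySem.Dict.mk diz) k).getD []).length
def pvM (diz : List (Int × List Int)) (vs : PySem.Set Int) : Nat :=
  (((pvKD diz).filter (fun k => !(PySem.Set.contains vs k))).map (pvWgt diz)).sum

theorem pvSumSplit (w : Int → Nat) (L : List Int) (hnd : L.Nodup) (n : Int) (hn : n ∈ L)
    (vs : List Int) (hv : n ∉ vs) :
    ((L.filter (fun k => !(PySem.Set.contains vs k))).map w).sum
      = w n + ((L.filter (fun k => !(PySem.Set.contains (vs ++ [n]) k))).map w).sum := by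
  have hcon : ∀ (u : List Int) (k : Int), PySem.Set.contains u k = decide (k ∈ u) := by
    intro u k; simp [PySem.Set.contains_eq_listContains]
  induction L with
  | nil => cases hn
  | cons a t ih =>
    rcases List.nodup_cons.mp hnd with ⟨hat, hndt⟩
    by_cases hna : n = a
    · subst hna
      have h1 : ((n :: t).filter (fun k => !(PySem.Set.contains vs k))) = n :: t.filter (fun k => !(PySem.Set.contains vs k)) := by
        simp [List.filter_cons, hcon, hv]
      have h2 : ((n :: t).filter (fun k => !(PySem.Set.contains (vs ++ [n]) k))) = t.filter (fun k => !(PySem.Set.contains (vs ++ [n]) k)) := by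
        simp [List.filter_cons, hcon]
      have h3 : t.filter (fun k => !(PySem.Set.contains (vs ++ [n]) k)) = t.filter (fun k => !(PySem.Set.contains vs k)) := by
        apply List.filter_congr
        intro k hk
        have hka : k ≠ n := fun h => hat (h ▸ hk)
        simp [hcon, hka]
      rw [h1, h2, h3]; simp
    · have hnt : n ∈ t := by
        rcases List.mem_cons.mp hn with h | h
        · exact absurd h hna
        · exact h
      have hstep := ih hndt hnt
      have hsame : PySem.Set.contains (vs ++ [n]) a = PySem.Set.contains vs a := by
        have : a ≠ n := fun h => hna h.symm
        simp [hcon, this]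
      simp only [hcon] at hstep hsame ⊢
      by_cases hav : a ∈ vs
      · simp only [List.filter_cons, hsame, hav, decide_true, Bool.not_true, if_neg]
        exact hstep
      · simp only [List.filter_cons, hsame, hav, decide_false, Bool.not_false, if_pos,
          List.map_cons, List.sum_cons]
        omega

theorem pvM_split (diz : List (Int × List Int)) (vs : List Int) (n : Int)
    (hn : n ∈ pvKD diz) (hv : n ∉ vs) :
    pvM diz vs = pvWgt diz n + pvM diz (PySem.Set.add vs n) := by
  unfold pvM
  rw [PySem.Set.add_of_not_mem hv]
  exact pvSumSplit (pvWgt diz) (pvKD diz) (PySem.List.nodup_dedup _) n hn vs hv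

theorem pvMemKD_of_get (diz : List (Int × List Int)) (n : Int) (l : List Int)
    (h : PySem.Dict.get? (PySem.Dict.mk diz) n = some l) : n ∈ pvKD diz := by
  have hk : n ∈ (PySem.Dict.mk diz).keys := by
    by_contra hk
    have := (PySem.Dict.get?_eq_none_iff_not_mem_keys (PySem.Dict.mk diz) n).mpr hk
    rw [h] at this
    cases this
  rw [PySem.Dict.keys_mk] at hk
  exact (PySem.List.mem_dedup _ n).mpr hk

-- B's while loop: pop the head, skip visited/absent nodes, record diz[n] and push the children.
-- (Python pushes reversed(children) and pops from the END; with the stack head-first here,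
-- that is exactly prepending the children in order.)
def loopB (diz : List (Int × List Int)) (stack : List Int) (vs : PySem.Set Int) (d : PySem.Dict Int (List Int)) : PySem.Dict Int (List Int) :=
  match stack with
  | [] => d
  | n :: rest =>
    if hc : PySem.Set.contains vs n then loopB diz rest vs d
    else
      match hg : PySem.Dict.get? (PySem.Dict.mk diz) n with
      | none => loopB diz rest vs d
      | some l => loopB diz (l ++ rest) (PySem.Set.add vs n) (PySem.Dict.insert d n l)
termination_by (pvM diz vs + stack.length)
decreasing_by
  · simp only [List.length_cons]; omega
  · simp only [List.length_cons]; omega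
  · have hmem : n ∈ pvKD diz := pvMemKD_of_get diz n l hg
    have hnv : n ∉ vs := fun h => hc ((PySem.Set.contains_iff vs n).mpr h)
    have hsp := pvM_split diz vs n hmem hnv
    have hw : pvWgt diz n = 1 + l.length := by simp [pvWgt, hg]
    simp only [List.length_append, List.length_cons]
    omega

def albero_alt (diz : List (Int × List Int)) (x : Int) (diz_ris : List (Int × List Int)) : Option (List (Int × List Int)) :=
  if PySem.Dict.contains (PySem.Dict.mk diz) x then
    some (PySem.Dict.items (loopB diz [x] PySem.Set.empty (PySem.Dict.mk diz_ris)))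
  else none

-- ===== PRECONDITION & SPEC =====
def pvK (diz : List (Int × List Int)) : List Int := diz.map Prod.fst
-- the child list diz[n] (empty when n is not a key)
def pvChildren (diz : List (Int × List Int)) (n : Int) : List Int :=
  (PySem.Dict.get? (PySem.Dict.mk diz) n).getD []
-- one step of the standard transitive-closure: add every key-child of a member
def pvStep (diz : List (Int × List Int)) (S : List Int) : List Int :=
  PySem.List.dedup (S ++ S.flatMap (fun m => (pvChildren diz m).filter (fun b => decide (b ∈ pvK diz))))
-- the set of keys reachable from r (diz.length closure steps reach the fixpoint)
def pvR (diz : List (Int × List Int)) (r : Int) : List Int := (pvStep diz)^[diz.length] [r]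

-- Pre_ excludes exactly the inputs on which A's recursion never returns (Python raises
-- RecursionError): x is a key and some key reachable from x lies on a cycle; on every input
-- where A returns a value, Pre_ holds.
def Pre_albero (diz : List (Int × List Int)) (x : Int) (diz_ris : List (Int × List Int)) : Prop :=
  x ∉ pvK diz ∨
    ∀ k ∈ pvR diz x, ∀ b ∈ pvChildren diz k, b ∈ pvK diz → k ∉ pvR diz b
instance (diz : List (Int × List Int)) (x : Int) (diz_ris : List (Int × List Int)) : Decidable (Pre_albero diz x diz_ris) := by unfold Pre_albero; infer_instance

def pvWitness_albero : (List (Int × List Int)) × Int × (List (Int × List Int)) :=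
  ([(1, [2, 3]), (2, []), (3, [])], 1, [(9, [9])])

def Spec_albero (diz : List (Int × List Int)) (x : Int) (diz_ris : List (Int × List Int)) (out : Option (List (Int × List Int))) : Prop := out = albero_alt diz x diz_ris
instance (diz : List (Int × List Int)) (x : Int) (diz_ris : List (Int × List Int)) (out : Option (List (Int × List Int))) : Decidable (Spec_albero diz x diz_ris out) := by unfold Spec_albero; infer_instance

-- ===== CLAIM (what is proved, stated in full; the proofs are below) =====
def Claim_equal_albero : Prop := ∀ (diz : List (Int × List Int)) (x : Int) (diz_ris : List (Int × List Int)), Dom_albero diz x diz_ris → Pre_albero diz x diz_ris → Spec_albero diz x diz_ris (albero diz x diz_ris)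

-- ===== LEMMAS AND PROOFS =====

-- iterates of the closure step
def pvT (diz : List (Int × List Int)) (r : Int) (i : Nat) : List Int := (pvStep diz)^[i] [r]

theorem pvR_eq_pvT (diz : List (Int × List Int)) (r : Int) : pvR diz r = pvT diz r diz.length := rfl

theorem pvT_succ (diz : List (Int × List Int)) (r : Int) (i : Nat) :
    pvT diz r (i + 1) = pvStep diz (pvT diz r i) := Function.iterate_succ_apply' _ _ _

theorem mem_pvStep (diz : List (Int × List Int)) (S : List Int) (a : Int) :
    a ∈ pvStep diz S ↔ a ∈ S ∨ ∃ m ∈ S, a ∈ pvChildren diz m ∧ a ∈ pvK diz := by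
  simp [pvStep, PySem.List.mem_dedup, List.mem_flatMap, List.mem_filter]

theorem pvT_mono (diz : List (Int × List Int)) (r : Int) (i : Nat) (a : Int)
    (h : a ∈ pvT diz r i) : a ∈ pvT diz r (i + 1) := by
  rw [pvT_succ]
  exact (mem_pvStep diz _ a).mpr (Or.inl h)

theorem pvT_mono_le (diz : List (Int × List Int)) (r : Int) {i j : Nat} (hij : i ≤ j) (a : Int)
    (h : a ∈ pvT diz r i) : a ∈ pvT diz r j := by
  induction j with
  | zero => have : i = 0 := Nat.le_zero.mp hij; exact this ▸ h
  | succ j ih =>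
    by_cases hj : i = j + 1
    · exact hj ▸ h
    · exact pvT_mono diz r j a (ih (by omega))

theorem pvT_nodup (diz : List (Int × List Int)) (r : Int) (i : Nat) : (pvT diz r i).Nodup := by
  cases i with
  | zero => simp [pvT]
  | succ i => rw [pvT_succ]; exact PySem.List.nodup_dedup _

theorem pvT_subK (diz : List (Int × List Int)) (r : Int) (hr : r ∈ pvK diz) (i : Nat) :
    ∀ a ∈ pvT diz r i, a ∈ pvK diz := by
  induction i with
  | zero =>
    intro a ha
    rw [show pvT diz r 0 = [r] from rfl, List.mem_singleton] at ha
    exact ha ▸ hr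
  | succ i ih =>
    intro a ha
    rw [pvT_succ] at ha
    rcases (mem_pvStep diz _ a).mp ha with h | ⟨m, _, _, hK⟩
    · exact ih a h
    · exact hK

theorem self_mem_pvR (diz : List (Int × List Int)) (r : Int) : r ∈ pvR diz r := by
  rw [pvR_eq_pvT]
  exact pvT_mono_le diz r (Nat.zero_le _) r (by simp [pvT])

theorem pvStep_congr (diz : List (Int × List Int)) (S S' : List Int)
    (h : ∀ a, a ∈ S ↔ a ∈ S') (a : Int) : a ∈ pvStep diz S ↔ a ∈ pvStep diz S' := by
  rw [mem_pvStep, mem_pvStep, h]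
  constructor
  · rintro (h1 | ⟨m, hm, h2⟩)
    · exact Or.inl h1
    · exact Or.inr ⟨m, (h m).mp hm, h2⟩
  · rintro (h1 | ⟨m, hm, h2⟩)
    · exact Or.inl h1
    · exact Or.inr ⟨m, (h m).mpr hm, h2⟩

theorem pvT_stall (diz : List (Int × List Int)) (r : Int) (i : Nat)
    (hst : ∀ a, a ∈ pvT diz r (i + 1) → a ∈ pvT diz r i) :
    ∀ j, i ≤ j → ∀ a, a ∈ pvT diz r j ↔ a ∈ pvT diz r i := by
  intro j
  induction j with
  | zero => intro hij a; have : i = 0 := Nat.le_zero.mp hij; rw [this]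
  | succ j ih =>
    intro hij a
    by_cases hj : i = j + 1
    · rw [hj]
    · have hijl : i ≤ j := by omega
      have hstep : a ∈ pvT diz r (j + 1) ↔ a ∈ pvT diz r (i + 1) := by
        rw [pvT_succ, pvT_succ]
        exact pvStep_congr diz _ _ (fun b => ih hijl b) a
      constructor
      · intro h; exact hst a (hstep.mp h)
      · intro h; exact pvT_mono_le diz r (by omega) a h

theorem pvT_len_le (diz : List (Int × List Int)) (r : Int) (hr : r ∈ pvK diz) (i : Nat) :
    (pvT diz r i).length ≤ diz.length := by
  have hnd := pvT_nodup diz r i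
  have hsub : (pvT diz r i).toFinset ⊆ (pvK diz).toFinset := by
    intro a ha
    rw [List.mem_toFinset] at ha ⊢
    exact pvT_subK diz r hr i a ha
  calc (pvT diz r i).length = (pvT diz r i).toFinset.card := (List.toFinset_card_of_nodup hnd).symm
    _ ≤ (pvK diz).toFinset.card := Finset.card_le_card hsub
    _ ≤ (pvK diz).length := List.toFinset_card_le _
    _ = diz.length := by simp [pvK]

theorem pvR_closed (diz : List (Int × List Int)) (r : Int) (hr : r ∈ pvK diz) :
    ∀ a, a ∈ pvStep diz (pvR diz r) → a ∈ pvR diz r := by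
  by_cases hst : ∃ i < diz.length, ∀ a, a ∈ pvT diz r (i + 1) → a ∈ pvT diz r i
  · obtain ⟨i, hi, hstall⟩ := hst
    intro a ha
    have hN := pvT_stall diz r i hstall diz.length (le_of_lt hi)
    rw [pvR_eq_pvT] at ha ⊢
    have h1 : a ∈ pvStep diz (pvT diz r i) :=
      (pvStep_congr diz _ _ hN a).mp ha
    rw [← pvT_succ] at h1
    exact (hN a).mpr (hstall a h1)
  · exfalso
    push Not at hst
    have hlen : ∀ i, i ≤ diz.length → i + 1 ≤ (pvT diz r i).length := by
      intro i
      induction i with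
      | zero => intro _; simp [pvT]
      | succ i ih =>
        intro hle
        obtain ⟨a, ha1, ha0⟩ := hst i (by omega)
        have hsubf : (pvT diz r i).toFinset ⊂ (pvT diz r (i + 1)).toFinset := by
          constructor
          · intro b hb
            rw [List.mem_toFinset] at hb ⊢
            exact pvT_mono diz r i b hb
          · intro hcon
            exact ha0 (List.mem_toFinset.mp (hcon (List.mem_toFinset.mpr ha1)))
        have hcard := Finset.card_lt_card hsubf
        rw [List.toFinset_card_of_nodup (pvT_nodup diz r i),
            List.toFinset_card_of_nodup (pvT_nodup diz r (i + 1))] at hcard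
        have := ih (by omega)
        omega
    have h1 := hlen diz.length le_rfl
    have h2 := pvT_len_le diz r hr diz.length
    omega

theorem pvR_sub (diz : List (Int × List Int)) (r b : Int) (hr : r ∈ pvK diz)
    (hb : b ∈ pvR diz r) : ∀ a ∈ pvR diz b, a ∈ pvR diz r := by
  have key : ∀ i, ∀ a ∈ pvT diz b i, a ∈ pvR diz r := by
    intro i
    induction i with
    | zero =>
      intro a ha
      rw [show pvT diz b 0 = [b] from rfl, List.mem_singleton] at ha
      exact ha ▸ hb
    | succ i ih =>
      intro a ha
      rw [pvT_succ] at ha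
      rcases (mem_pvStep diz _ a).mp ha with h | ⟨m, hm, hc, hK⟩
      · exact ih a h
      · exact pvR_closed diz r hr a ((mem_pvStep diz _ a).mpr (Or.inr ⟨m, ih m hm, hc, hK⟩))
  exact key diz.length

-- rank of a node: the size of its reachable set; strictly decreasing along edges under Pre_
def pvRank (diz : List (Int × List Int)) (r : Int) : Nat := (pvR diz r).length
-- pvIdx turns the rank into a measure that strictly INCREASES along edges
def pvIdx (diz : List (Int × List Int)) (v : Int) : Nat := diz.length + 1 - pvRank diz v

theorem pvR_nodup (diz : List (Int × List Int)) (r : Int) : (pvR diz r).Nodup :=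
  pvT_nodup diz r diz.length

theorem pvRank_pos (diz : List (Int × List Int)) (r : Int) : 1 ≤ pvRank diz r := by
  have h : 0 < (pvR diz r).length := List.length_pos_of_mem (self_mem_pvR diz r)
  unfold pvRank
  omega

theorem pvRank_le (diz : List (Int × List Int)) (r : Int) (hr : r ∈ pvK diz) :
    pvRank diz r ≤ diz.length := pvT_len_le diz r hr diz.length

theorem pvIdx_le (diz : List (Int × List Int)) (v : Int) : pvIdx diz v ≤ diz.length := by
  have := pvRank_pos diz v
  unfold pvIdx
  omega

theorem pvIdx_one_le (diz : List (Int × List Int)) (v : Int) (hv : v ∈ pvK diz) :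
    1 ≤ pvIdx diz v := by
  have := pvRank_le diz v hv
  unfold pvIdx pvRank at *
  omega

-- under Pre_'s no-reachable-cycle condition, pvIdx strictly increases along edges out of
-- nodes reachable from x
theorem pvIdx_edge (diz : List (Int × List Int)) (x : Int) (hx : x ∈ pvK diz)
    (hPre : ∀ k ∈ pvR diz x, ∀ b ∈ pvChildren diz k, b ∈ pvK diz → k ∉ pvR diz b)
    (n b : Int) (hn : n ∈ pvR diz x) (hb : b ∈ pvChildren diz n) (hbK : b ∈ pvK diz) :
    pvIdx diz n < pvIdx diz b := by
  have hnK : n ∈ pvK diz := pvT_subK diz x hx diz.length n hn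
  have hbR : b ∈ pvR diz n :=
    pvR_closed diz n hnK b ((mem_pvStep diz _ b).mpr (Or.inr ⟨n, self_mem_pvR diz n, hb, hbK⟩))
  have hsub : ∀ a ∈ pvR diz b, a ∈ pvR diz n := pvR_sub diz n b hnK hbR
  have hnotin : n ∉ pvR diz b := hPre n hn b hb hbK
  have hlt : pvRank diz b < pvRank diz n := by
    have hsubf : (pvR diz b).toFinset ⊂ (pvR diz n).toFinset := by
      constructor
      · intro a ha
        rw [List.mem_toFinset] at ha ⊢
        exact hsub a ha
      · intro hcon
        exact hnotin (List.mem_toFinset.mp (hcon (List.mem_toFinset.mpr (self_mem_pvR diz n))))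
    have := Finset.card_lt_card hsubf
    rwa [List.toFinset_card_of_nodup (pvR_nodup diz b),
        List.toFinset_card_of_nodup (pvR_nodup diz n)] at this
  have h1 := pvRank_le diz n hnK
  have h2 := pvRank_pos diz b
  unfold pvIdx
  omega

-- membership in pvK from the dict primitives
theorem pvMemK_of_get (diz : List (Int × List Int)) (n : Int) (l : List Int)
    (h : PySem.Dict.get? (PySem.Dict.mk diz) n = some l) : n ∈ pvK diz := by
  have hk : n ∈ (PySem.Dict.mk diz).keys := by
    by_contra hk
    have := (PySem.Dict.get?_eq_none_iff_not_mem_keys (PySem.Dict.mk diz) n).mpr hk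
    rw [h] at this
    cases this
  rw [PySem.Dict.keys_mk] at hk
  exact hk

theorem pvNotMemK_of_get_none (diz : List (Int × List Int)) (n : Int)
    (h : PySem.Dict.get? (PySem.Dict.mk diz) n = none) : n ∉ pvK diz := by
  have := (PySem.Dict.get?_eq_none_iff_not_mem_keys (PySem.Dict.mk diz) n).mp h
  rw [PySem.Dict.keys_mk] at this
  exact this

theorem pvChildren_eq (diz : List (Int × List Int)) (n : Int) (l : List Int)
    (h : PySem.Dict.get? (PySem.Dict.mk diz) n = some l) : pvChildren diz n = l := by
  simp [pvChildren, h]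

-- invariant: every visited node is a key reachable from the root set R and its entry is
-- already written in d
def pvInv (diz : List (Int × List Int)) (R : List Int) (vs : List Int) (d : PySem.Dict Int (List Int)) : Prop :=
  ∀ v ∈ vs, (v ∈ pvK diz ∧ v ∈ R) ∧ PySem.Dict.insert d v (pvChildren diz v) = d

-- every visited node of measure ≥ ρ is fully explored (its key-children are visited)
def pvBlk (diz : List (Int × List Int)) (ρ : Nat) (vs : List Int) : Prop :=
  ∀ v ∈ vs, ρ ≤ pvIdx diz v → ∀ b ∈ pvChildren diz v, b ∈ pvK diz → b ∈ vs

-- the proof-layer recursive visitor with a visited set (B's loop in recursive form)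
mutual
def visR (diz : List (Int × List Int)) (f : Nat) (n : Int) (vs : PySem.Set Int) (d : PySem.Dict Int (List Int)) : Option (PySem.Set Int × PySem.Dict Int (List Int)) :=
  match f with
  | 0 => none
  | f' + 1 =>
    if PySem.Set.contains vs n then some (vs, d)
    else
      match PySem.Dict.get? (PySem.Dict.mk diz) n with
      | none => some (vs, d)
      | some l => visL diz f' l (PySem.Set.add vs n) (PySem.Dict.insert d n l)
termination_by (f, 0)

def visL (diz : List (Int × List Int)) (f : Nat) (l : List Int) (vs : PySem.Set Int) (d : PySem.Dict Int (List Int)) : Option (PySem.Set Int × PySem.Dict Int (List Int)) :=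
  match l with
  | [] => some (vs, d)
  | i :: t =>
    match visR diz f i vs d with
    | none => none
    | some (vs', d') => visL diz f t vs' d'
termination_by (f, l.length + 1)

end


-- small bridges
theorem pvContains_decide (u : List Int) (k : Int) : PySem.Set.contains u k = decide (k ∈ u) := by
  simp [PySem.Set.contains_eq_listContains]

-- dict algebra
theorem dictContains_of_insert_eq {d : PySem.Dict Int (List Int)} {v : Int} {u : List Int}
    (h : d.insert v u = d) : d.contains v = true := by
  by_contra hc
  have hc' : d.contains v = false := by
    cases hcv : d.contains v
    · rfl
    · exact absurd hcv hc
  have h2 := congrArg PySem.Dict.items h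
  rw [PySem.Dict.items_insert_of_not_contains d u hc'] at h2
  have : d.items.length + 1 = d.items.length := by
    simpa using congrArg List.length h2
  omega

theorem dictInsert_absorb {d : PySem.Dict Int (List Int)} {v m : Int} {u w : List Int}
    (h : d.insert v u = d) (hne : m ≠ v) :
    (d.insert m w).insert v u = d.insert m w := by
  have hc : d.contains v = true := dictContains_of_insert_eq h
  have hitems : d.items.map (fun p => if (p.1 == v) = true then (v, u) else p) = d.items := by
    have h2 := congrArg PySem.Dict.items h
    rwa [PySem.Dict.items_insert_of_contains d u hc] at h2
  have hcm : (d.insert m w).contains v = true := by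
    rw [PySem.Dict.contains_insert]
    simp [hc]
  apply PySem.Dict.ext
  rw [PySem.Dict.items_insert_of_contains _ u hcm]
  cases hm : d.contains m
  · rw [PySem.Dict.items_insert_of_not_contains d w hm]
    rw [List.map_append]
    rw [hitems]
    simp [hne]
  · rw [PySem.Dict.items_insert_of_contains d w hm]
    conv_rhs => rw [← hitems]
    rw [List.map_map, List.map_map]
    apply List.map_congr_left
    intro p _
    simp only [Function.comp_apply]
    by_cases h1 : p.1 = m
    · simp [h1, hne]
    · by_cases h2 : p.1 = v <;> simp [h1, h2, Ne.symm hne]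

-- monotonicity of the unvisited weight
theorem pvSumMono (w : Int → Nat) (L : List Int) (vs vs' : List Int) (hsub : vs ⊆ vs') :
    ((L.filter (fun k => !(PySem.Set.contains vs' k))).map w).sum
      ≤ ((L.filter (fun k => !(PySem.Set.contains vs k))).map w).sum := by
  induction L with
  | nil => simp
  | cons a t ih =>
    simp only [pvContains_decide] at ih ⊢
    simp only [List.filter_cons]
    by_cases hav : a ∈ vs
    · have hav' : a ∈ vs' := hsub hav
      simp only [hav, hav', decide_true, Bool.not_true, if_neg]
      exact ih
    · by_cases hav' : a ∈ vs'
      · simp only [hav, hav', decide_true, decide_false, Bool.not_true, Bool.not_false,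
          Bool.false_eq_true, if_false, if_true, List.map_cons, List.sum_cons]
        omega
      · simp only [hav, hav', decide_false, Bool.not_false, if_true, List.map_cons, List.sum_cons]
        omega

theorem pvM_mono (diz : List (Int × List Int)) {vs vs' : List Int} (hsub : vs ⊆ vs') :
    pvM diz vs' ≤ pvM diz vs :=
  pvSumMono (pvWgt diz) (pvKD diz) vs vs' hsub

-- invariant preservation when a new node is recorded
theorem pvInv_step (diz : List (Int × List Int)) (R : List Int) {vs : List Int} {d : PySem.Dict Int (List Int)}
    {n : Int} {l : List Int} (hI : pvInv diz R vs d) (hv : n ∉ vs) (hK : n ∈ pvK diz) (hR : n ∈ R)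
    (hval : pvChildren diz n = l) : pvInv diz R (vs ++ [n]) (PySem.Dict.insert d n l) := by
  intro v hvm
  rcases List.mem_append.mp hvm with h | h
  · have hne : n ≠ v := fun he => hv (he ▸ h)
    exact ⟨(hI v h).1, dictInsert_absorb (hI v h).2 hne⟩
  · have : v = n := by simpa using h
    subst this
    refine ⟨⟨hK, hR⟩, ?_⟩
    rw [hval]
    exact PySem.Dict.insert_insert_self d v l l

theorem goA_succ_none (diz : List (Int × List Int)) (f : Nat) (n : Int) (d : PySem.Dict Int (List Int))
    (hg : PySem.Dict.get? (PySem.Dict.mk diz) n = none) : goA diz (f+1) n d = some d := by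
  rw [goA]; simp [hg]

theorem goA_succ_some (diz : List (Int × List Int)) (f : Nat) (n : Int) (d : PySem.Dict Int (List Int))
    (l : List Int) (hg : PySem.Dict.get? (PySem.Dict.mk diz) n = some l) :
    goA diz (f+1) n d = goAList diz f l (PySem.Dict.insert d n l) := by
  rw [goA]
  simp only [hg]
  cases l with
  | nil => simp
  | cons a t => simp

theorem goAList_nil (diz : List (Int × List Int)) (f : Nat) (d : PySem.Dict Int (List Int)) :
    goAList diz f [] d = some d := by rw [goAList]

theorem goAList_cons (diz : List (Int × List Int)) (f : Nat) (i : Int) (t : List Int) (d : PySem.Dict Int (List Int)) :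
    goAList diz f (i :: t) d = match goA diz f i d with
      | none => none
      | some d' => goAList diz f t d' := by rw [goAList]

theorem visR_succ_mem (diz : List (Int × List Int)) (f : Nat) (n : Int) (vs : PySem.Set Int) (d : PySem.Dict Int (List Int))
    (h : n ∈ vs) : visR diz (f+1) n vs d = some (vs, d) := by
  rw [visR]
  simp [pvContains_decide, h]

theorem visR_succ_none (diz : List (Int × List Int)) (f : Nat) (n : Int) (vs : PySem.Set Int) (d : PySem.Dict Int (List Int))
    (h : n ∉ vs) (hg : PySem.Dict.get? (PySem.Dict.mk diz) n = none) :
    visR diz (f+1) n vs d = some (vs, d) := by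
  rw [visR]
  simp [pvContains_decide, h, hg]

theorem visR_succ_some (diz : List (Int × List Int)) (f : Nat) (n : Int) (vs : PySem.Set Int) (d : PySem.Dict Int (List Int))
    (l : List Int) (h : n ∉ vs) (hg : PySem.Dict.get? (PySem.Dict.mk diz) n = some l) :
    visR diz (f+1) n vs d = visL diz f l (vs ++ [n]) (PySem.Dict.insert d n l) := by
  rw [visR]
  simp [pvContains_decide, h, hg, PySem.Set.add_of_not_mem h]

theorem visL_nil (diz : List (Int × List Int)) (f : Nat) (vs : PySem.Set Int) (d : PySem.Dict Int (List Int)) :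
    visL diz f [] vs d = some (vs, d) := by rw [visL]

theorem visL_cons (diz : List (Int × List Int)) (f : Nat) (i : Int) (t : List Int) (vs : PySem.Set Int) (d : PySem.Dict Int (List Int)) :
    visL diz f (i :: t) vs d = match visR diz f i vs d with
      | none => none
      | some (vs', d') => visL diz f t vs' d' := by rw [visL]

theorem loopB_nil (diz : List (Int × List Int)) (vs : PySem.Set Int) (d : PySem.Dict Int (List Int)) :
    loopB diz [] vs d = d := by rw [loopB]

theorem loopB_cons_mem (diz : List (Int × List Int)) (n : Int) (rest : List Int) (vs : PySem.Set Int) (d : PySem.Dict Int (List Int))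
    (h : n ∈ vs) : loopB diz (n :: rest) vs d = loopB diz rest vs d := by
  rw [loopB]
  simp [pvContains_decide, h]

theorem loopB_cons_none (diz : List (Int × List Int)) (n : Int) (rest : List Int) (vs : PySem.Set Int) (d : PySem.Dict Int (List Int))
    (h : n ∉ vs) (hg : PySem.Dict.get? (PySem.Dict.mk diz) n = none) :
    loopB diz (n :: rest) vs d = loopB diz rest vs d := by
  rw [loopB]
  have hc : ¬ (PySem.Set.contains vs n = true) := by simp [pvContains_decide, h]
  rw [dif_neg hc]
  split
  · rfl
  · rename_i l hg2
    rw [hg] at hg2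
    cases hg2

theorem loopB_cons_some (diz : List (Int × List Int)) (n : Int) (rest : List Int) (vs : PySem.Set Int) (d : PySem.Dict Int (List Int))
    (l : List Int) (h : n ∉ vs) (hg : PySem.Dict.get? (PySem.Dict.mk diz) n = some l) :
    loopB diz (n :: rest) vs d = loopB diz (l ++ rest) (vs ++ [n]) (PySem.Dict.insert d n l) := by
  rw [loopB]
  have hc : ¬ (PySem.Set.contains vs n = true) := by simp [pvContains_decide, h]
  rw [dif_neg hc]
  split
  · rename_i hg2
    rw [hg] at hg2
    cases hg2
  · rename_i l2 hg2
    rw [hg] at hg2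
    injection hg2 with hl
    subst hl
    rw [PySem.Set.add_of_not_mem h]
-- A's walk over an already fully-explored node leaves the dict unchanged
theorem pvASkip (diz : List (Int × List Int)) (R : List Int)
    (hed : ∀ n ∈ R, ∀ b ∈ pvChildren diz n, b ∈ pvK diz → pvIdx diz n < pvIdx diz b) (ρ : Nat) :
    ∀ (fa : Nat) (n : Int) (vs : List Int) (d : PySem.Dict Int (List Int)),
      pvInv diz R vs d → pvBlk diz ρ vs → n ∈ vs → ρ ≤ pvIdx diz n →
      diz.length + 2 ≤ pvIdx diz n + fa →
      goA diz fa n d = some d := by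
  intro fa
  induction fa with
  | zero =>
    intro n vs d hI hB hn hρ hfa
    have := pvIdx_le diz n
    omega
  | succ fb ih =>
    intro n vs d hI hB hn hρ hfa
    have hK : n ∈ pvK diz := (hI n hn).1.1
    have hR : n ∈ R := (hI n hn).1.2
    obtain ⟨l, hg⟩ : ∃ l, PySem.Dict.get? (PySem.Dict.mk diz) n = some l := by
      cases hgg : PySem.Dict.get? (PySem.Dict.mk diz) n
      · exact absurd hK (pvNotMemK_of_get_none diz n hgg)
      · exact ⟨_, rfl⟩
    have hval : pvChildren diz n = l := pvChildren_eq diz n l hg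
    have hins : PySem.Dict.insert d n l = d := by
      have := (hI n hn).2
      rwa [hval] at this
    rw [goA_succ_some diz fb n d l hg, hins]
    have hchild : ∀ c ∈ l, c ∈ pvK diz → c ∈ vs ∧ pvIdx diz n < pvIdx diz c := by
      intro c hc hcK
      refine ⟨hB n hn hρ c (hval ▸ hc) hcK, hed n hR c (hval ▸ hc) hcK⟩
    clear hg hins hval
    induction l with
    | nil => exact goAList_nil diz fb d
    | cons c t iht =>
      rw [goAList_cons]
      have hstep : goA diz fb c d = some d := by
        by_cases hcK : c ∈ pvK diz
        · obtain ⟨hcvs, hidx⟩ := hchild c (by simp) hcK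
          exact ih c vs d hI hB hcvs (by omega) (by omega)
        · obtain ⟨fb', rfl⟩ : ∃ fb', fb = fb' + 1 := by
            have := pvIdx_le diz n
            exact ⟨fb - 1, by omega⟩
          have hgc : PySem.Dict.get? (PySem.Dict.mk diz) c = none := by
            cases hgg : PySem.Dict.get? (PySem.Dict.mk diz) c
            · rfl
            · exact absurd (pvMemK_of_get diz c _ hgg) hcK
          exact goA_succ_none diz fb' c d hgc
      rw [hstep]
      exact iht (fun c' hc' => hchild c' (by simp [hc']))
-- the joint induction statement for single nodes
def pvP (diz : List (Int × List Int)) (R : List Int) (f : Nat) : Prop :=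
  ∀ (n : Int) (vs : List Int) (d : PySem.Dict Int (List Int)) (ρ fa : Nat),
    pvInv diz R vs d → pvBlk diz ρ vs →
    (n ∈ pvK diz → n ∈ R ∧ ρ ≤ pvIdx diz n ∧ diz.length + 2 ≤ pvIdx diz n + fa) →
    (n ∉ pvK diz → 1 ≤ fa) → pvM diz vs + 1 ≤ f →
    ∃ vs' d', visR diz f n vs d = some (vs', d') ∧ goA diz fa n d = some d' ∧ vs ⊆ vs' ∧
      pvInv diz R vs' d' ∧ pvBlk diz ρ vs' ∧ (∀ v ∈ vs', v ∉ vs → ρ ≤ pvIdx diz v) ∧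
      (n ∈ pvK diz → n ∈ vs')

-- child lists, assuming the single-node statement at the same fuel
theorem pvMainQ (diz : List (Int × List Int)) (R : List Int) (f : Nat) (hP : pvP diz R f) :
    ∀ (l : List Int) (vs : List Int) (d : PySem.Dict Int (List Int)) (ρ fb : Nat),
      pvInv diz R vs d → pvBlk diz ρ vs →
      (∀ c ∈ l, c ∈ pvK diz → c ∈ R ∧ ρ ≤ pvIdx diz c ∧ diz.length + 2 ≤ pvIdx diz c + fb) →
      1 ≤ fb → pvM diz vs + 1 ≤ f →
      ∃ vs' d', visL diz f l vs d = some (vs', d') ∧ goAList diz fb l d = some d' ∧ vs ⊆ vs' ∧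
        pvInv diz R vs' d' ∧ pvBlk diz ρ vs' ∧ (∀ v ∈ vs', v ∉ vs → ρ ≤ pvIdx diz v) ∧
        (∀ c ∈ l, c ∈ pvK diz → c ∈ vs') := by
  intro l
  induction l with
  | nil =>
    intro vs d ρ fb hI hB _ _ _
    refine ⟨vs, d, visL_nil diz f vs d, goAList_nil diz fb d, List.Subset.refl _, hI, hB, ?_, ?_⟩
    · intro v _ hv2; exact absurd ‹v ∈ vs› hv2
    · intro c hc; cases hc
  | cons c t iht =>
    intro vs d ρ fb hI hB hl hfb hf
    obtain ⟨vs1, d1, hvis1, hgo1, hsub1, hI1, hB1, hnew1, hmem1⟩ :=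
      hP c vs d ρ fb hI hB (hl c (by simp)) (fun _ => hfb) hf
    have hf1 : pvM diz vs1 + 1 ≤ f := le_trans (by have := pvM_mono diz hsub1; omega) hf
    obtain ⟨vs', d', hvis2, hgo2, hsub2, hI', hB', hnew2, hmem2⟩ :=
      iht vs1 d1 ρ fb hI1 hB1 (fun c' hc' => hl c' (by simp [hc'])) hfb hf1
    refine ⟨vs', d', ?_, ?_, List.Subset.trans hsub1 hsub2, hI', hB', ?_, ?_⟩
    · rw [visL_cons, hvis1]; exact hvis2
    · rw [goAList_cons, hgo1]; exact hgo2
    · intro v hv' hvns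
      by_cases h1 : v ∈ vs1
      · exact hnew1 v h1 hvns
      · exact hnew2 v hv' h1
    · intro c' hc' hcK
      rcases List.mem_cons.mp hc' with rfl | hct
      · exact hsub2 (hmem1 hcK)
      · exact hmem2 c' hct hcK

theorem pvMainP (diz : List (Int × List Int)) (R : List Int)
    (hcl : ∀ n ∈ R, ∀ b ∈ pvChildren diz n, b ∈ pvK diz → b ∈ R)
    (hed : ∀ n ∈ R, ∀ b ∈ pvChildren diz n, b ∈ pvK diz → pvIdx diz n < pvIdx diz b) :
    ∀ f, pvP diz R f := by
  intro f
  induction f with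
  | zero => intro n vs d ρ fa _ _ _ _ hf; omega
  | succ f ih =>
    intro n vs d ρ fa hI hB h3 h4 hf
    by_cases hv : n ∈ vs
    · have hK : n ∈ pvK diz := (hI n hv).1.1
      obtain ⟨hR, hρ, hfa⟩ := h3 hK
      refine ⟨vs, d, visR_succ_mem diz f n vs d hv,
        pvASkip diz R hed ρ fa n vs d hI hB hv hρ hfa, List.Subset.refl _, hI, hB, ?_, fun _ => hv⟩
      intro v hv' hvns; exact absurd hv' hvns
    · cases hg : PySem.Dict.get? (PySem.Dict.mk diz) n with
      | none =>
        have hnK : n ∉ pvK diz := pvNotMemK_of_get_none diz n hg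
        obtain ⟨fb, rfl⟩ : ∃ fb, fa = fb + 1 := ⟨fa - 1, by have := h4 hnK; omega⟩
        refine ⟨vs, d, visR_succ_none diz f n vs d hv hg, goA_succ_none diz fb n d hg,
          List.Subset.refl _, hI, hB, ?_, fun h => absurd h hnK⟩
        intro v hv' hvns; exact absurd hv' hvns
      | some l =>
        have hK : n ∈ pvK diz := pvMemK_of_get diz n l hg
        obtain ⟨hnR, hρ, hfa⟩ := h3 hK
        have hlt := pvIdx_le diz n
        obtain ⟨fb, rfl⟩ : ∃ fb, fa = fb + 1 := ⟨fa - 1, by omega⟩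
        have hval : pvChildren diz n = l := pvChildren_eq diz n l hg
        have hI0 : pvInv diz R (vs ++ [n]) (PySem.Dict.insert d n l) :=
          pvInv_step diz R hI hv hK hnR hval
        have hB0 : pvBlk diz (pvIdx diz n + 1) (vs ++ [n]) := by
          intro v hvm hρ' b hb hbK
          rcases List.mem_append.mp hvm with h | h
          · exact List.mem_append_left _ (hB v h (by omega) b hb hbK)
          · have : v = n := by simpa using h
            subst this
            omega
        have hf0 : pvM diz (vs ++ [n]) + 1 ≤ f := by
          have hkd : n ∈ pvKD diz := by
            rw [pvKD, PySem.List.mem_dedup]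
            exact hK
          have hsp := pvM_split diz vs n hkd hv
          rw [PySem.Set.add_of_not_mem hv] at hsp
          have hw : 1 ≤ pvWgt diz n := by simp [pvWgt]
          omega
        have hchild : ∀ c ∈ l, c ∈ pvK diz →
            c ∈ R ∧ pvIdx diz n + 1 ≤ pvIdx diz c ∧
            diz.length + 2 ≤ pvIdx diz c + fb := by
          intro c hc hcK
          have h1 := hcl n hnR c (hval ▸ hc) hcK
          have h2 := hed n hnR c (hval ▸ hc) hcK
          exact ⟨h1, by omega, by omega⟩
        obtain ⟨vs', d', hvisL, hgoL, hsub', hI', hB', hnew', hmemL⟩ :=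
          pvMainQ diz R f ih l (vs ++ [n]) (PySem.Dict.insert d n l) (pvIdx diz n + 1) fb
            hI0 hB0 hchild (by omega) hf0
        have hsub0 : vs ⊆ vs ++ [n] := by intro v hv'; exact List.mem_append_left _ hv'
        have hnvs' : n ∈ vs' := hsub' (by simp)
        refine ⟨vs', d', ?_, ?_, List.Subset.trans hsub0 hsub', hI', ?_, ?_, fun _ => hnvs'⟩
        · rw [visR_succ_some diz f n vs d l hv hg]; exact hvisL
        · rw [goA_succ_some diz fb n d l hg]; exact hgoL
        · -- pvBlk ρ vs'
          intro v hv' hρv b hb hbK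
          by_cases h0 : v ∈ vs ++ [n]
          · rcases List.mem_append.mp h0 with h | h
            · exact hsub' (hsub0 (hB v h hρv b hb hbK))
            · have : v = n := by simpa using h
              subst this
              rw [hval] at hb
              exact hmemL b hb hbK
          · exact hB' v hv' (by have := hnew' v hv' h0; omega) b hb hbK
        · -- new nodes have measure ≥ ρ
          intro v hv' hvns
          by_cases h0 : v ∈ vs ++ [n]
          · rcases List.mem_append.mp h0 with h | h
            · exact absurd h hvns
            · have : v = n := by simpa using h
              subst this; omega
          · have := hnew' v hv' h0; omega
-- the stack loop follows the recursive visitor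
theorem pvPushQ (diz : List (Int × List Int)) (f : Nat)
    (hP : ∀ (n : Int) (vs : PySem.Set Int) (d : PySem.Dict Int (List Int)) vs' d',
      visR diz f n vs d = some (vs', d') → ∀ s, loopB diz (n :: s) vs d = loopB diz s vs' d') :
    ∀ (l : List Int) (vs : PySem.Set Int) (d : PySem.Dict Int (List Int)) vs' d',
      visL diz f l vs d = some (vs', d') → ∀ s, loopB diz (l ++ s) vs d = loopB diz s vs' d' := by
  intro l
  induction l with
  | nil =>
    intro vs d vs' d' h s
    rw [visL_nil] at h
    injection h with h
    injection h with h1 h2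
    subst h1; subst h2
    rfl
  | cons c t iht =>
    intro vs d vs' d' h s
    rw [visL_cons] at h
    cases hv1 : visR diz f c vs d with
    | none => rw [hv1] at h; cases h
    | some p =>
      obtain ⟨vs1, d1⟩ := p
      rw [hv1] at h
      simp only at h
      have : (c :: (t ++ s)) = (c :: t) ++ s := rfl
      show loopB diz (c :: (t ++ s)) vs d = loopB diz s vs' d'
      rw [hP c vs d vs1 d1 hv1 (t ++ s)]
      exact iht vs1 d1 vs' d' h s

theorem pvPushP (diz : List (Int × List Int)) :
    ∀ (f : Nat) (n : Int) (vs : PySem.Set Int) (d : PySem.Dict Int (List Int)) vs' d',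
      visR diz f n vs d = some (vs', d') → ∀ s, loopB diz (n :: s) vs d = loopB diz s vs' d' := by
  intro f
  induction f with
  | zero => intro n vs d vs' d' h; rw [visR] at h; cases h
  | succ f ih =>
    intro n vs d vs' d' h s
    by_cases hv : n ∈ vs
    · rw [visR_succ_mem diz f n vs d hv] at h
      injection h with h
      injection h with h1 h2
      subst h1; subst h2
      exact loopB_cons_mem diz n s vs d hv
    · cases hg : PySem.Dict.get? (PySem.Dict.mk diz) n with
      | none =>
        rw [visR_succ_none diz f n vs d hv hg] at h
        injection h with h
        injection h with h1 h2
        subst h1; subst h2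
        exact loopB_cons_none diz n s vs d hv hg
      | some l =>
        rw [visR_succ_some diz f n vs d l hv hg] at h
        rw [loopB_cons_some diz n s vs d l hv hg]
        exact pvPushQ diz f ih l (vs ++ [n]) (PySem.Dict.insert d n l) vs' d' h s

-- ===== VERDICT (by name: the statement is the Claim_ definition above) =====
theorem albero_spec : Claim_equal_albero := by
  intro diz x diz_ris _hDom hPre
  unfold Spec_albero albero albero_alt
  by_cases hc : PySem.Dict.contains (PySem.Dict.mk diz) x = true
  · rw [if_pos hc, if_pos hc]
    have hget : (PySem.Dict.get? (PySem.Dict.mk diz) x).isSome := by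
      rw [← PySem.Dict.contains_eq_isSome_get?]; exact hc
    obtain ⟨l0, hg0⟩ := Option.isSome_iff_exists.mp hget
    have hxK : x ∈ pvK diz := pvMemK_of_get diz x l0 hg0
    have hPre2 : ∀ k ∈ pvR diz x, ∀ b ∈ pvChildren diz k, b ∈ pvK diz → k ∉ pvR diz b := by
      rcases hPre with h | h
      · exact absurd hxK h
      · exact h
    have hcl : ∀ n ∈ pvR diz x, ∀ b ∈ pvChildren diz n, b ∈ pvK diz → b ∈ pvR diz x := by
      intro n hn b hb hbK
      exact pvR_closed diz x hxK b ((mem_pvStep diz _ b).mpr (Or.inr ⟨n, hn, hb, hbK⟩))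
    have hed : ∀ n ∈ pvR diz x, ∀ b ∈ pvChildren diz n, b ∈ pvK diz → pvIdx diz n < pvIdx diz b :=
      fun n hn b hb hbK => pvIdx_edge diz x hxK hPre2 n b hn hb hbK
    have hix := pvIdx_one_le diz x hxK
    obtain ⟨vs', d', hvis, hgo, _, _, _, _, _⟩ :=
      pvMainP diz (pvR diz x) hcl hed (pvM diz [] + 1) x [] (PySem.Dict.mk diz_ris) 0 (diz.length + 1)
        (by intro v hv; cases hv) (by intro v hv _ b _ _; cases hv)
        (fun _ => ⟨self_mem_pvR diz x, Nat.zero_le _, by omega⟩) (fun _ => by omega) (le_refl _)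
    rw [hgo]
    have hstep := pvPushP diz (pvM diz [] + 1) x [] (PySem.Dict.mk diz_ris) vs' d' hvis []
    have hloop : loopB diz [x] PySem.Set.empty (PySem.Dict.mk diz_ris) = d' := by
      show loopB diz (x :: []) [] (PySem.Dict.mk diz_ris) = d'
      rw [hstep, loopB_nil]
    rw [hloop]
    rfl
  · rw [if_neg hc, if_neg hc]
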